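-- pv_equiv track=rewrite | github.com/nimrodmls/huji-cs-intro | week11/assignment/ex11_utils.py | create_words_dict
-- ===== SOURCE A (Python) =====
-- from typing import List, Tuple, Iterable, Optional, Dict, Callable, Set
--
-- WordsDictionary = Dict[int, Dict[str, Set]]
--
-- def create_words_dict(words: Iterable[str]) -> WordsDictionary:
--     """
--     Creates a sorted words dictionary according to the specification
--     further documented in the top of the file.
--     """
--     sorted_dict = {}
--     for word in words:
--         if len(word) not in sorted_dict:
--             sorted_dict[len(word)] = {}
--
--         anagram = "".join(sorted(word))
--         if anagram not in sorted_dict[len(word)]: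
--             sorted_dict[len(word)][anagram] = set()
--
--         sorted_dict[len(word)][anagram].add(word)
--
--     return sorted_dict
-- ===== SOURCE B (Python) =====
-- def create_words_dict(words):
--     # Staged grouping by repeated selection: first collect the distinct lengths
--     # (in first-occurrence order), then for each length the distinct anagram
--     # signatures among the words of that length, then select each group's words.
--     words = list(words)
--     return {
--         length: {
--             sig: {w for w in words
--                   if len(w) == length and "".join(sorted(w)) == sig}
--             for sig in dict.fromkeys(
--                 "".join(sorted(w)) for w in words if len(w) == length)
--         }
--         for length in dict.fromkeys(len(w) for w in words)
--     }
-- ===== Notes on version B (the rewrite author's own statement) =====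
-- stated objective: alternative
-- what changed: Replaces A's single-pass incremental nested hash-bucketing with staged grouping by repeated selection: dedup the lengths in first-occurrence order, then per length dedup the anagram signatures, then build each group by filtering the word list.
import Mathlib
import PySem

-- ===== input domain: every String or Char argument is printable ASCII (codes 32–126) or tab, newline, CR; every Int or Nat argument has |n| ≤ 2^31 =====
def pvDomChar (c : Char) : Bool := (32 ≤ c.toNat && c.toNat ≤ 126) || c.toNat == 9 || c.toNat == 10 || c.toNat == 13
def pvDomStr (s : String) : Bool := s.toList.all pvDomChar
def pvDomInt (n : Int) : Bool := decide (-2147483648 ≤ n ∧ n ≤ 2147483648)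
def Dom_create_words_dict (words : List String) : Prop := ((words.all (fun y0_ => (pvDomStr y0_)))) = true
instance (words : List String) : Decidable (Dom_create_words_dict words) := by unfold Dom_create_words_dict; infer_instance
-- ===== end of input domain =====

-- B replaces A's single-pass incremental nested hash-bucketing by staged grouping through
-- repeated selection: dedup the lengths, then per length dedup the signatures, then select
-- each group's words by filtering; alternative decomposition, same result.

-- shared helpers: len(word) and "".join(sorted(word))
def wlen (w : String) : Int := (PySem.Str.len w : Int)
def wsig (w : String) : String := String.ofList (PySem.List.sorted w.toList (fun c => c) false)

-- ===== PORT A =====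
def create_words_dict (words : List String) : List (Int × List (String × List String)) :=
  let sorted_dict : PySem.Dict Int (PySem.Dict String (PySem.Set String)) :=
    words.foldl (fun sorted_dict word =>
      let sorted_dict :=
        if sorted_dict.contains (wlen word) then sorted_dict
        else sorted_dict.insert (wlen word) PySem.Dict.empty
      let anagram := wsig word
      let inner := sorted_dict.getD (wlen word) PySem.Dict.empty
      let inner :=
        if inner.contains anagram then inner
        else inner.insert anagram PySem.Set.empty
      sorted_dict.insert (wlen word)
        (inner.insert anagram (PySem.Set.add (inner.getD anagram PySem.Set.empty) word)))
      PySem.Dict.empty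
  sorted_dict.items.map (fun p => (p.1, p.2.items))

-- ===== PORT B =====
def create_words_dict_alt (words : List String) : List (Int × List (String × List String)) :=
  (PySem.List.dedup (words.map (fun w => wlen w))).map (fun length =>
    (length,
      (PySem.List.dedup ((words.filter (fun w => wlen w == length)).map (fun w => wsig w))).map
        (fun sig =>
          (sig, PySem.Set.ofList
            (words.filter (fun w => wlen w == length && wsig w == sig))))))

-- ===== PRECONDITION & SPEC =====
def Spec_create_words_dict (words : List String) (out : List (Int × List (String × List String))) : Prop := out = create_words_dict_alt words
instance (words : List String) (out : List (Int × List (String × List String))) : Decidable (Spec_create_words_dict words out) := by unfold Spec_create_words_dict; infer_instance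

-- ===== CLAIM (what is proved, stated in full; the proofs are below) =====
def Claim_equal_create_words_dict : Prop := ∀ (words : List String), Dom_create_words_dict words → Spec_create_words_dict words (create_words_dict words)

-- ===== LEMMAS AND PROOFS =====

-- A's loop step, named
def astepF (sorted_dict : PySem.Dict Int (PySem.Dict String (PySem.Set String))) (word : String) :
    PySem.Dict Int (PySem.Dict String (PySem.Set String)) :=
  let sorted_dict :=
    if sorted_dict.contains (wlen word) then sorted_dict
    else sorted_dict.insert (wlen word) PySem.Dict.empty
  let anagram := wsig word
  let inner := sorted_dict.getD (wlen word) PySem.Dict.empty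
  let inner :=
    if inner.contains anagram then inner
    else inner.insert anagram PySem.Set.empty
  sorted_dict.insert (wlen word)
    (inner.insert anagram (PySem.Set.add (inner.getD anagram PySem.Set.empty) word))

-- A's step collapses to one nested insert
lemma astepF_eq (d : PySem.Dict Int (PySem.Dict String (PySem.Set String))) (w : String) :
    astepF d w = d.insert (wlen w)
      ((d.getD (wlen w) PySem.Dict.empty).insert (wsig w)
        (PySem.Set.add ((d.getD (wlen w) PySem.Dict.empty).getD (wsig w) PySem.Set.empty) w)) := by
  unfold astepF
  by_cases hl : d.contains (wlen w) = true
  · simp only [hl, if_true]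
    by_cases hs : (d.getD (wlen w) PySem.Dict.empty).contains (wsig w) = true
    · simp [hs]
    · simp only [hs, Bool.false_eq_true, if_false, PySem.Dict.insert_insert_self,
        PySem.Dict.getD_insert_self]
      rw [PySem.Dict.getD_of_not_contains (d.getD (wlen w) PySem.Dict.empty)
            PySem.Set.empty (by simpa using hs)]
  · simp only [hl, Bool.false_eq_true, if_false, PySem.Dict.getD_insert_self,
      PySem.Dict.contains_empty, PySem.Dict.insert_insert_self]
    rw [PySem.Dict.getD_of_not_contains d PySem.Dict.empty (by simpa using hl),
        PySem.Dict.getD_empty]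

-- the inner dict B effectively builds for one length, as a Dict value
def innerD (ws : List String) (l : Int) : PySem.Dict String (PySem.Set String) :=
  PySem.Dict.mk
    ((PySem.List.dedup ((ws.filter (fun w => wlen w == l)).map (fun w => wsig w))).map
      (fun s => (s, PySem.Set.ofList (ws.filter (fun w => wlen w == l && wsig w == s)))))

lemma ofList_append_singleton {α : Type} [BEq α] (xs : List α) (a : α) :
    PySem.Set.ofList (xs ++ [a]) = PySem.Set.add (PySem.Set.ofList xs) a := by
  rw [PySem.Set.ofList_eq_foldl, PySem.Set.ofList_eq_foldl, List.foldl_append]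
  rfl

lemma dedup_append_singleton {α : Type} [BEq α] (xs : List α) (a : α) :
    PySem.List.dedup (xs ++ [a]) = PySem.Set.add (PySem.List.dedup xs) a := by
  rw [PySem.List.dedup_eq_ofList, PySem.List.dedup_eq_ofList, ofList_append_singleton]

lemma add_of_mem {α : Type} [BEq α] [LawfulBEq α] (s : PySem.Set α) (a : α) (h : a ∈ s) :
    PySem.Set.add s a = s := by simp [PySem.Set.add, h]

lemma add_of_not_mem {α : Type} [BEq α] [LawfulBEq α] (s : PySem.Set α) (a : α) (h : a ∉ s) :
    PySem.Set.add s a = s ++ [a] := by simp [PySem.Set.add, h]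

-- appending a word of a different length changes nothing at that length
lemma innerD_append_of_ne (ws : List String) (w : String) (l : Int) (h : wlen w ≠ l) :
    innerD (ws ++ [w]) l = innerD ws l := by
  unfold innerD
  have hb : (wlen w == l) = false := by simpa using h
  simp [List.filter_append, hb]

lemma innerD_keys_nodup (ws : List String) (l : Int) : (innerD ws l).keys.Nodup := by
  unfold innerD
  rw [PySem.Dict.keys_mk, List.map_map]
  have : ((fun (x : String × PySem.Set String) => x.1) ∘
      (fun s => (s, PySem.Set.ofList (ws.filter (fun w => wlen w == l && wsig w == s))))) = id := by
    funext s; rfl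
  rw [this, List.map_id]
  exact PySem.List.nodup_dedup _

-- appending a word updates exactly its own length's inner dict the way A's step does
lemma innerD_append_self (ws : List String) (w : String) :
    innerD (ws ++ [w]) (wlen w)
      = (innerD ws (wlen w)).insert (wsig w)
          (PySem.Set.add ((innerD ws (wlen w)).getD (wsig w) PySem.Set.empty) w) := by
  apply PySem.Dict.ext
  have hfil : (ws ++ [w]).filter (fun x => wlen x == wlen w)
      = ws.filter (fun x => wlen x == wlen w) ++ [w] := by
    simp [List.filter_append]
  by_cases hmem : wsig w ∈ (ws.filter (fun x => wlen x == wlen w)).map (fun x => wsig x)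
  · -- signature already present: overwrite in place
    have hcont : (innerD ws (wlen w)).contains (wsig w) = true := by
      rw [PySem.Dict.contains_iff_mem_keys]
      unfold innerD
      rw [PySem.Dict.keys_mk, List.map_map]
      simpa [Function.comp, PySem.List.mem_dedup] using hmem
    have hgetD : (innerD ws (wlen w)).getD (wsig w) PySem.Set.empty
        = PySem.Set.ofList (ws.filter (fun x => wlen x == wlen w && wsig x == wsig w)) := by
      apply PySem.Dict.getD_of_mem_items _ _ (innerD_keys_nodup ws (wlen w))
      unfold innerD
      exact List.mem_map_of_mem (by simpa [PySem.List.mem_dedup] using hmem)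
    rw [PySem.Dict.items_insert_of_contains _ _ hcont, hgetD]
    unfold innerD
    rw [hfil, List.map_append]
    simp only [List.map_cons, List.map_nil]
    rw [dedup_append_singleton,
        add_of_mem (PySem.List.dedup ((ws.filter (fun x => wlen x == wlen w)).map (fun x => wsig x)))
          (wsig w) (by simpa [PySem.List.mem_dedup] using hmem)]
    simp only [List.map_map]
    apply List.map_congr_left
    intro s hs
    simp only [Function.comp]
    by_cases hss : s = wsig w
    · subst hss
      simp only [beq_self_eq_true, if_true, Prod.mk.injEq, true_and]
      simp [List.filter_append, ofList_append_singleton]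
    · have hbs : (s == wsig w) = false := by simpa using hss
      have hws : ¬ (wsig w = s) := fun h => hss h.symm
      simp only [hbs, Bool.false_eq_true, if_false, Prod.mk.injEq, true_and]
      simp [List.filter_append, hws]
  · -- fresh signature: appended at the end
    have hcont : (innerD ws (wlen w)).contains (wsig w) = false := by
      rw [← Bool.not_eq_true, PySem.Dict.contains_iff_mem_keys]
      unfold innerD
      rw [PySem.Dict.keys_mk, List.map_map]
      simpa [Function.comp, PySem.List.mem_dedup] using hmem
    have hempty : ws.filter (fun x => wlen x == wlen w && wsig x == wsig w) = [] := by
      rw [List.filter_eq_nil_iff]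
      intro x hx hb
      simp only [Bool.and_eq_true, beq_iff_eq] at hb
      exact hmem (hb.2 ▸ List.mem_map_of_mem (List.mem_filter.mpr ⟨hx, by simp [hb.1]⟩))
    rw [PySem.Dict.items_insert_of_not_contains _ _ hcont,
        PySem.Dict.getD_of_not_contains _ _ hcont]
    unfold innerD
    rw [hfil, List.map_append]
    simp only [List.map_cons, List.map_nil]
    rw [dedup_append_singleton,
        add_of_not_mem (PySem.List.dedup ((ws.filter (fun x => wlen x == wlen w)).map (fun x => wsig x)))
          (wsig w) (by simpa [PySem.List.mem_dedup] using hmem)]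
    rw [List.map_append]
    congr 1
    · apply List.map_congr_left
      intro s hs
      have hsne : s ≠ wsig w := by
        intro h; exact hmem (by simpa [PySem.List.mem_dedup, h] using hs)
      have hws : ¬ (wsig w = s) := fun h => hsne h.symm
      simp [List.filter_append, hws]
    · simp only [List.map_cons, List.map_nil]
      rw [List.filter_append, hempty]
      simp [PySem.Set.add, PySem.Set.empty, PySem.Set.ofList]

-- main invariant: A's fold builds exactly B's staged grouping
lemma afold_items (ws : List String) :
    (ws.foldl astepF PySem.Dict.empty).items
      = (PySem.List.dedup (ws.map (fun w => wlen w))).map (fun l => (l, innerD ws l)) := by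
  induction ws using List.reverseRecOn with
  | nil => rfl
  | append_singleton ws w ih =>
    rw [List.foldl_append, List.foldl_cons, List.foldl_nil, astepF_eq]
    have hkeys : (ws.foldl astepF PySem.Dict.empty).keys
        = PySem.List.dedup (ws.map (fun w => wlen w)) := by
      show (ws.foldl astepF PySem.Dict.empty).items.map (fun p => p.1) = _
      rw [ih, List.map_map]
      have : ((fun (p : Int × PySem.Dict String (PySem.Set String)) => p.1) ∘
          (fun l => (l, innerD ws l))) = id := by funext l; rfl
      rw [this, List.map_id]
    have hknd : (ws.foldl astepF PySem.Dict.empty).keys.Nodup := by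
      rw [hkeys]; exact PySem.List.nodup_dedup _
    rw [List.map_append]
    simp only [List.map_cons, List.map_nil]
    rw [dedup_append_singleton]
    by_cases hmem : wlen w ∈ ws.map (fun w => wlen w)
    · have hcont : (ws.foldl astepF PySem.Dict.empty).contains (wlen w) = true := by
        rw [PySem.Dict.contains_iff_mem_keys, hkeys]
        simpa [PySem.List.mem_dedup] using hmem
      have hgetD : (ws.foldl astepF PySem.Dict.empty).getD (wlen w) PySem.Dict.empty
          = innerD ws (wlen w) := by
        apply PySem.Dict.getD_of_mem_items _ _ hknd
        rw [ih]
        exact List.mem_map_of_mem (by simpa [PySem.List.mem_dedup] using hmem)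
      rw [PySem.Dict.items_insert_of_contains _ _ hcont, hgetD, ih,
          add_of_mem (PySem.List.dedup (ws.map (fun w => wlen w)))
            (wlen w) (by simpa [PySem.List.mem_dedup] using hmem)]
      rw [List.map_map]
      apply List.map_congr_left
      intro l hl
      simp only [Function.comp]
      by_cases hll : l = wlen w
      · subst hll
        simp only [beq_self_eq_true, if_true, Prod.mk.injEq, true_and]
        exact (innerD_append_self ws w).symm
      · have : (l == wlen w) = false := by simpa using hll
        simp only [this, Bool.false_eq_true, if_false, Prod.mk.injEq, true_and]
        exact (innerD_append_of_ne ws w l (fun h => hll h.symm)).symm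
    · have hcont : (ws.foldl astepF PySem.Dict.empty).contains (wlen w) = false := by
        rw [← Bool.not_eq_true, PySem.Dict.contains_iff_mem_keys, hkeys]
        simpa [PySem.List.mem_dedup] using hmem
      rw [PySem.Dict.items_insert_of_not_contains _ _ hcont,
          PySem.Dict.getD_of_not_contains _ _ hcont, ih,
          add_of_not_mem (PySem.List.dedup (ws.map (fun w => wlen w)))
            (wlen w) (by simpa [PySem.List.mem_dedup] using hmem),
          List.map_append]
      congr 1
      · apply List.map_congr_left
        intro l hl
        have hlne : l ≠ wlen w := by
          intro h; exact hmem (by simpa [PySem.List.mem_dedup, h] using hl)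
        exact congrArg _ (innerD_append_of_ne ws w l (fun h => hlne h.symm)).symm
      · simp only [List.map_cons, List.map_nil]
        congr 2
        have hfw : ws.filter (fun x => wlen x == wlen w) = [] := by
          rw [List.filter_eq_nil_iff]
          intro x hx hb
          exact hmem ((show wlen x = wlen w by simpa using hb) ▸ List.mem_map_of_mem hx)
        have hstep := innerD_append_self ws w
        rw [hstep]
        unfold innerD
        rw [hfw]
        have hcont0 : (PySem.Dict.mk ([] : List (String × PySem.Set String))).contains (wsig w) = false := by
          rw [PySem.Dict.contains_mk]; rfl
        apply PySem.Dict.ext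
        simp only [List.map_nil]
        rw [show PySem.List.dedup ([] : List String) = [] from rfl, List.map_nil]
        rw [PySem.Dict.getD_of_not_contains _ _ (by exact hcont0),
            PySem.Dict.items_insert_of_not_contains _ _ hcont0,
            PySem.Dict.items_insert_of_not_contains _ _ (by simp [PySem.Dict.contains_empty])]
        rfl

theorem create_words_dict_main (words : List String) :
    create_words_dict words = create_words_dict_alt words := by
  show (words.foldl astepF PySem.Dict.empty).items.map (fun p => (p.1, p.2.items)) = _
  rw [afold_items, List.map_map]
  unfold create_words_dict_alt innerD
  apply List.map_congr_left
  intro l _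
  rfl

-- ===== VERDICT (by name: the statement is the Claim_ definition above) =====
theorem create_words_dict_spec : Claim_equal_create_words_dict := by
  intro words _
  unfold Spec_create_words_dict
  exact create_words_dict_main words
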